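-- pv_equiv track=rewrite | github.com/aldairwontroba/Predict_Pleno | utilitarios/extracao de dat/hunt_dolm2_window.py | guess_lot
-- ===== SOURCE A (Python) =====
-- def guess_lot(ascii_field):
--     # tenta achar um lote pequeno 1..100 perto do preço (heurística boba)
--     nums=[]
--     for token in ascii_field.split():
--         if '@' not in token: continue
--         val, off = token.split('@', 1)
--         if val.isdigit():
--             n=int(val)
--             if 1 <= n <= 100:
--                 try:
--                     offi = int(off)
--                 except:
--                     offi = 0
--                 nums.append((abs(offi), n))
--     if not nums: return None
--     nums.sort()
--     return nums[0][1]
-- ===== SOURCE B (Python) =====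
-- def guess_lot(ascii_field):
--     # single streaming min-scan: no intermediate list, no sort
--     best = None
--     for token in ascii_field.split():
--         if '@' not in token:
--             continue
--         val, off = token.split('@', 1)
--         if val.isdigit():
--             n = int(val)
--             if 1 <= n <= 100:
--                 try:
--                     offi = int(off)
--                 except:
--                     offi = 0
--                 cand = (abs(offi), n)
--                 if best is None or cand < best:
--                     best = cand
--     return None if best is None else best[1]
-- ===== Notes on version B (the rewrite author's own statement) =====
-- stated objective: alternative
-- what changed: B replaces A's build-a-list-of-(abs(offset),n)-tuples, sort, take-first pipeline by a single streaming min-scan that keeps one best (abs(offset),n) tuple and replaces it only when strictly lexicographically smaller, so no intermediate list and no sort exist.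
import Mathlib
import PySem

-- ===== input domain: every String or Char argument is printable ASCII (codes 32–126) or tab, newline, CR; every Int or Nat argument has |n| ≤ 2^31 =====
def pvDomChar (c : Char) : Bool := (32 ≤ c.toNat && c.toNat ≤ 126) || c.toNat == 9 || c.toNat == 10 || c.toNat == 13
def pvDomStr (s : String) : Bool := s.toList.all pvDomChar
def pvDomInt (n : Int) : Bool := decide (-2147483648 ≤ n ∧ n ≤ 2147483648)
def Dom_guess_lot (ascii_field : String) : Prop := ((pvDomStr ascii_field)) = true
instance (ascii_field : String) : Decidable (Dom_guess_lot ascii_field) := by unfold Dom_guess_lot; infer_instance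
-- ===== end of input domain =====

-- B replaces A's build-list / sort / take-first pipeline by a single streaming min-scan
-- keeping one best (abs(offset), n) tuple; same return value, no intermediate list or sort.

-- ===== PORT A =====
-- literal port of A: collect (abs(offi), n) tuples, sort (Python tuple order = lexicographic), take nums[0][1]
def guess_lot (ascii_field : String) : Option Int :=
  let nums : List (Int × Int) :=
    (PySem.Str.split₀ ascii_field).foldl (fun nums token =>
      if PySem.Str.isIn "@" token then
        match PySem.Str.splitMax? token "@" 1 with
        | some [val, off] =>
          if PySem.Str.strIsdigit val then
            let n := (PySem.Int.ofStr? val).getD 0      -- int(val): succeeds since val.isdigit()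
            if 1 ≤ n ∧ n ≤ 100 then
              let offi := (PySem.Int.ofStr? off).getD 0 -- try: int(off) except: 0
              nums ++ [(|offi|, n)]
            else nums
          else nums
        | _ => nums   -- unreachable: '@' ∈ token so split('@',1) yields exactly two pieces
      else nums) []
  match nums with
  | [] => none
  | _ :: _ =>
    match PySem.List.sorted2 nums Prod.fst Prod.snd with
    | (_, n) :: _ => some n
    | [] => none    -- unreachable: sorted list of a nonempty list is nonempty

-- ===== PORT B =====
-- literal port of Source B: one pass, 'best' holds the least (abs(offi), n) seen so far
-- (cand < best is Python's lexicographic tuple comparison, spelled out on the components)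
def guess_lot_alt (ascii_field : String) : Option Int :=
  let best : Option (Int × Int) :=
    (PySem.Str.split₀ ascii_field).foldl (fun best token =>
      if PySem.Str.isIn "@" token then
        -- token.split('@', 1): sep ≠ "" so splitMax? is always `some`; getD [] unwraps it
        match (PySem.Str.splitMax? token "@" 1).getD [] with
        | [] => best      -- unreachable: '@' ∈ token gives two pieces
        | [_] => best     -- unreachable likewise
        | val :: off :: _ =>
          if PySem.Str.strIsdigit val then
            let n := (PySem.Int.ofStr? val).getD 0
            if 1 ≤ n ∧ n ≤ 100 then
              let offi := (PySem.Int.ofStr? off).getD 0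
              let cand := (|offi|, n)
              match best with
              | none => some cand
              | some b =>
                if cand.1 < b.1 ∨ (cand.1 = b.1 ∧ cand.2 < b.2) then some cand else some b
            else best
          else best
      else best) (none : Option (Int × Int))
  best.map Prod.snd

-- ===== PRECONDITION & SPEC =====
def Spec_guess_lot (ascii_field : String) (out : Option Int) : Prop := out = guess_lot_alt ascii_field
instance (ascii_field : String) (out : Option Int) : Decidable (Spec_guess_lot ascii_field out) := by unfold Spec_guess_lot; infer_instance

-- ===== CLAIM (what is proved, stated in full; the proofs are below) =====
def Claim_equal_guess_lot : Prop := ∀ (ascii_field : String), Dom_guess_lot ascii_field → Spec_guess_lot ascii_field (guess_lot ascii_field)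

-- ===== LEMMAS AND PROOFS =====

-- the candidate a token contributes (proof-side helper; same branch structure as both ports' bodies)
def pvCand? (token : String) : Option (Int × Int) :=
  if PySem.Str.isIn "@" token then
    match PySem.Str.splitMax? token "@" 1 with
    | some [val, off] =>
      if PySem.Str.strIsdigit val then
        let n := (PySem.Int.ofStr? val).getD 0
        if 1 ≤ n ∧ n ≤ 100 then some (|(PySem.Int.ofStr? off).getD 0|, n) else none
      else none
    | _ => none
  else none

-- B's replacement step
def pvStep (best : Option (Int × Int)) (c : Int × Int) : Option (Int × Int) :=
  match best with
  | none => some c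
  | some b => if c.1 < b.1 ∨ (c.1 = b.1 ∧ c.2 < b.2) then some c else some b

lemma pvA_body (ns : List (Int × Int)) (t : String) :
    (if PySem.Str.isIn "@" t then
        match PySem.Str.splitMax? t "@" 1 with
        | some [val, off] =>
          if PySem.Str.strIsdigit val then
            let n := (PySem.Int.ofStr? val).getD 0
            if 1 ≤ n ∧ n ≤ 100 then
              let offi := (PySem.Int.ofStr? off).getD 0
              ns ++ [(|offi|, n)]
            else ns
          else ns
        | _ => ns
      else ns) = ns ++ (pvCand? t).toList := by
  unfold pvCand?
  split_ifs <;> (try simp) <;>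
    (rename_i h; rcases hs : PySem.Str.splitMax? t "@" 1 with _ | ⟨_ | ⟨v, _ | ⟨o, _ | _⟩⟩⟩ <;>
      simp_all <;> split_ifs <;> simp_all)

-- split('@', 1) yields at most maxsplit+1 pieces
lemma pvGo_len (sep : List Char) (fuel m : Nat) (l cur : List Char) (acc : List (List Char)) :
    (PySem.Chars.splitOnMax.go sep fuel m l cur acc).length ≤ acc.length + 1 + m := by
  induction fuel generalizing m l cur acc with
  | zero => simp [PySem.Chars.splitOnMax.go]
  | succ fuel ih =>
    cases l with
    | nil => simp [PySem.Chars.splitOnMax.go]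
    | cons c rest =>
      simp only [PySem.Chars.splitOnMax.go]
      split_ifs with hm hp
      · simp
      · have := ih (m - 1) (List.drop sep.length (c :: rest)) [] (cur.reverse :: acc)
        simp at this ⊢
        omega
      · have := ih m rest (c :: cur) acc
        omega

lemma pvSplitMax_two (t : String) (l : List String)
    (h : PySem.Str.splitMax? t "@" 1 = some l) : l.length ≤ 2 := by
  have hg := pvGo_len "@".toList (t.toList.length + 1) ((1 : Int)).toNat t.toList [] []
  simp only [PySem.Str.splitMax?, PySem.Chars.splitMax?, PySem.Chars.splitOnMax] at h
  norm_num at h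
  rcases h with ⟨cl, ⟨-, hcl⟩, hl⟩
  subst hl
  rw [List.length_map, ← hcl]
  simpa using hg

lemma pvB_body (b : Option (Int × Int)) (t : String) :
    (if PySem.Str.isIn "@" t then
        match (PySem.Str.splitMax? t "@" 1).getD [] with
        | [] => b
        | [_] => b
        | val :: off :: _ =>
          if PySem.Str.strIsdigit val then
            let n := (PySem.Int.ofStr? val).getD 0
            if 1 ≤ n ∧ n ≤ 100 then
              let offi := (PySem.Int.ofStr? off).getD 0
              let cand := (|offi|, n)
              match b with
              | none => some cand
              | some bb =>
                if cand.1 < bb.1 ∨ (cand.1 = bb.1 ∧ cand.2 < bb.2) then some cand else some bb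
            else b
          else b
      else b) = (pvCand? t).toList.foldl pvStep b := by
  unfold pvCand? pvStep
  by_cases hin : PySem.Str.isIn "@" t
  · simp only [hin, if_true]
    rcases hs : PySem.Str.splitMax? t "@" 1 with _ | l
    · exact absurd hs (by simp [PySem.Str.splitMax?, PySem.Chars.splitMax?])
    · have hlen := pvSplitMax_two t l hs
      match l, hlen with
      | [], _ => simp
      | [v], _ => simp
      | [v, o], _ => simp only [Option.getD_some]; split_ifs <;> simp_all
      | v :: o :: x :: xs, h => simp at h
  · simp at hin
    simp [hin]

lemma pvA_fold (ts : List String) (ns : List (Int × Int)) :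
    ts.foldl (fun ns t => ns ++ (pvCand? t).toList) ns
      = ns ++ ts.flatMap (fun t => (pvCand? t).toList) := by
  induction ts generalizing ns with
  | nil => simp
  | cons t ts ih => simp [ih, List.append_assoc]

lemma pvB_fold (ts : List String) (b : Option (Int × Int)) :
    ts.foldl (fun b t => (pvCand? t).toList.foldl pvStep b) b
      = (ts.flatMap (fun t => (pvCand? t).toList)).foldl pvStep b := by
  induction ts generalizing b with
  | nil => simp
  | cons t ts ih =>
    simp only [List.foldl_cons, List.flatMap_cons, List.foldl_append, ih]

-- Python's lexicographic tuple comparison as the sort's comparison boolean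
lemma pvLt_iff (x y : Int × Int) :
    (decide (x.1 < y.1) || (!decide (y.1 < x.1) && decide (x.2 < y.2))) = true
      ↔ (x.1 < y.1 ∨ (x.1 = y.1 ∧ x.2 < y.2)) := by
  simp only [Bool.or_eq_true, Bool.and_eq_true, Bool.not_eq_true', decide_eq_true_eq,
    decide_eq_false_iff_not]
  omega

-- head of an insertion equals the min-step on heads
lemma pvHead_insertBy (x : Int × Int) (acc : List (Int × Int)) :
    (PySem.List.insertBy
        (fun a b => decide (a.1 < b.1) || (!decide (b.1 < a.1) && decide (a.2 < b.2)))
        x acc).head?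
      = pvStep acc.head? x := by
  cases acc with
  | nil => simp [PySem.List.insertBy, pvStep]
  | cons y ys =>
    show (if (decide (x.1 < y.1) || (!decide (y.1 < x.1) && decide (x.2 < y.2))) = true
          then x :: y :: ys
          else y :: PySem.List.insertBy _ x ys).head? = _
    by_cases h : x.1 < y.1 ∨ (x.1 = y.1 ∧ x.2 < y.2)
    · rw [if_pos ((pvLt_iff x y).mpr h)]
      simp [pvStep, h]
    · rw [if_neg (fun hb => h ((pvLt_iff x y).mp hb))]
      simp [pvStep, h]

-- head of Python's stable sort of cs (lexicographic tuple key) = B's streaming min over cs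
lemma pvHead_sorted2 (cs : List (Int × Int)) (acc : List (Int × Int)) :
    (cs.foldl (fun acc x =>
        PySem.List.insertBy
          (fun a b => decide (a.1 < b.1) || (!decide (b.1 < a.1) && decide (a.2 < b.2)))
          x acc) acc).head?
      = cs.foldl pvStep acc.head? := by
  induction cs generalizing acc with
  | nil => rfl
  | cons c cs ih => rw [List.foldl_cons, List.foldl_cons, ih, pvHead_insertBy]

lemma pvSorted2_head (cs : List (Int × Int)) :
    (PySem.List.sorted2 cs Prod.fst Prod.snd).head? = cs.foldl pvStep none := by
  have := pvHead_sorted2 cs []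
  simpa [PySem.List.sorted2] using this

-- ===== VERDICT (by name: the statement is the Claim_ definition above) =====
theorem guess_lot_spec : Claim_equal_guess_lot := by
  intro s _
  show guess_lot s = guess_lot_alt s
  unfold guess_lot guess_lot_alt
  have hA : ∀ ts : List String,
      ts.foldl (fun (ns : List (Int × Int)) token =>
        if PySem.Str.isIn "@" token then
          match PySem.Str.splitMax? token "@" 1 with
          | some [val, off] =>
            if PySem.Str.strIsdigit val then
              let n := (PySem.Int.ofStr? val).getD 0
              if 1 ≤ n ∧ n ≤ 100 then
                let offi := (PySem.Int.ofStr? off).getD 0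
                ns ++ [(|offi|, n)]
              else ns
            else ns
          | _ => ns
        else ns) []
      = ts.flatMap (fun t => (pvCand? t).toList) := by
    intro ts
    have : ∀ ns, ts.foldl (fun (ns : List (Int × Int)) t => ns ++ (pvCand? t).toList) ns
        = ns ++ ts.flatMap (fun t => (pvCand? t).toList) := fun ns => pvA_fold ts ns
    rw [show (fun (ns : List (Int × Int)) (token : String) =>
        if PySem.Str.isIn "@" token then
          match PySem.Str.splitMax? token "@" 1 with
          | some [val, off] =>
            if PySem.Str.strIsdigit val then
              let n := (PySem.Int.ofStr? val).getD 0
              if 1 ≤ n ∧ n ≤ 100 then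
                let offi := (PySem.Int.ofStr? off).getD 0
                ns ++ [(|offi|, n)]
              else ns
            else ns
          | _ => ns
        else ns) = fun ns t => ns ++ (pvCand? t).toList from funext fun ns => funext fun t => pvA_body ns t]
    simpa using this []
  have hB : ∀ ts : List String,
      ts.foldl (fun (b : Option (Int × Int)) token =>
        if PySem.Str.isIn "@" token then
          match (PySem.Str.splitMax? token "@" 1).getD [] with
          | [] => b
          | [_] => b
          | val :: off :: _ =>
            if PySem.Str.strIsdigit val then
              let n := (PySem.Int.ofStr? val).getD 0
              if 1 ≤ n ∧ n ≤ 100 then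
                let offi := (PySem.Int.ofStr? off).getD 0
                let cand := (|offi|, n)
                match b with
                | none => some cand
                | some bb =>
                  if cand.1 < bb.1 ∨ (cand.1 = bb.1 ∧ cand.2 < bb.2) then some cand else some bb
              else b
            else b
        else b) none
      = (ts.flatMap (fun t => (pvCand? t).toList)).foldl pvStep none := by
    intro ts
    rw [show (fun (b : Option (Int × Int)) (token : String) =>
        if PySem.Str.isIn "@" token then
          match (PySem.Str.splitMax? token "@" 1).getD [] with
          | [] => b
          | [_] => b
          | val :: off :: _ =>
            if PySem.Str.strIsdigit val then
              let n := (PySem.Int.ofStr? val).getD 0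
              if 1 ≤ n ∧ n ≤ 100 then
                let offi := (PySem.Int.ofStr? off).getD 0
                let cand := (|offi|, n)
                match b with
                | none => some cand
                | some bb =>
                  if cand.1 < bb.1 ∨ (cand.1 = bb.1 ∧ cand.2 < bb.2) then some cand else some bb
              else b
            else b
        else b) = fun b t => (pvCand? t).toList.foldl pvStep b from
      funext fun b => funext fun t => pvB_body b t]
    exact pvB_fold ts none
  rw [hA, hB]
  dsimp only
  set cs := (PySem.Str.split₀ s).flatMap (fun t => (pvCand? t).toList) with hcs
  cases h : cs with
  | nil => rfl
  | cons c cs' =>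
    have hne : PySem.List.sorted2 (c :: cs') Prod.fst Prod.snd ≠ [] := by
      intro hnil
      have := PySem.List.sorted2_perm (xs := c :: cs') (k1 := Prod.fst) (k2 := Prod.snd)
        (rev := false)
      rw [hnil] at this
      exact absurd this.symm (by simp)
    have hh := pvSorted2_head (c :: cs')
    rcases hs : PySem.List.sorted2 (c :: cs') Prod.fst Prod.snd with _ | ⟨⟨a, n⟩, rest⟩
    · exact absurd hs hne
    · rw [hs] at hh
      simp only [List.head?_cons] at hh
      rw [← hh]
      rfl
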